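-- pv_equiv track=rewrite | github.com/rafilo/CS565 | project1/kmeans.py | disagreement_dist
-- ===== SOURCE A (Python) =====
-- def disagreement_dist(assignment1, assignment2):
-- 	dis_distance = 0
-- 	for i in range(len(assignment1)):
-- 		for j in range(i,len(assignment1)):
-- 			if (assignment1[i] == assignment1[j]) and (assignment2[i] != assignment2[j]):
-- 				dis_distance += 1
-- 			elif (assignment1[i] != assignment1[j]) and (assignment2[i] == assignment2[j]):
-- 				dis_distance += 1
-- 	return dis_distance
-- ===== SOURCE B (Python) =====
-- def disagreement_dist(assignment1, assignment2):
--     count1 = {}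
--     count2 = {}
--     count12 = {}
--     dis_distance = 0
--     for x, y in zip(assignment1, assignment2):
--         dis_distance += count1.get(x, 0) + count2.get(y, 0) - 2 * count12.get((x, y), 0)
--         count1[x] = count1.get(x, 0) + 1
--         count2[y] = count2.get(y, 0) + 1
--         count12[(x, y)] = count12.get((x, y), 0) + 1
--     return dis_distance
-- ===== Notes on version B (the rewrite author's own statement) =====
-- stated objective: faster
-- what changed: Replaced the nested all-pairs index scan by a single pass over zip(assignment1, assignment2) that keeps frequency dictionaries for each clustering's label and for the joint label pair, adding each element's pair-disagreement count against the already-seen prefix.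
import Mathlib
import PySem

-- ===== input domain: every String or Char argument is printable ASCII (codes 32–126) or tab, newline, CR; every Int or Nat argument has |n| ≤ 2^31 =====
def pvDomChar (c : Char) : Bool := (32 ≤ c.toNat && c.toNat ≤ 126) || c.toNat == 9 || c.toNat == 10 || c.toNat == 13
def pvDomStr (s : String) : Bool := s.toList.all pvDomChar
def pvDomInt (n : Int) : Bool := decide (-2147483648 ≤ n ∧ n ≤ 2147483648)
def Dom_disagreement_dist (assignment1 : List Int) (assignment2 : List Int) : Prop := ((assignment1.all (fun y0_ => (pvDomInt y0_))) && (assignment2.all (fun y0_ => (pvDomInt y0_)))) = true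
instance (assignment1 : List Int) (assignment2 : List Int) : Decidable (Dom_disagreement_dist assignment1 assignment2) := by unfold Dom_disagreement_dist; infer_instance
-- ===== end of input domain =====

-- B replaces A's quadratic all-pairs index scan by one linear pass over
-- zip(assignment1, assignment2) that keeps frequency dictionaries.

-- ===== PORT A =====
-- literal port of A's nested index loops; pyGetD is Python's xs[i] (in range under Pre_)
def disagreement_dist (assignment1 : List Int) (assignment2 : List Int) : Int :=
  (PySem.List.pyRange 0 (assignment1.length : Int) 1).foldl (fun dis i =>
    (PySem.List.pyRange i (assignment1.length : Int) 1).foldl (fun dis j =>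
      if PySem.List.pyGetD assignment1 i 0 = PySem.List.pyGetD assignment1 j 0 ∧
         PySem.List.pyGetD assignment2 i 0 ≠ PySem.List.pyGetD assignment2 j 0 then dis + 1
      else if PySem.List.pyGetD assignment1 i 0 ≠ PySem.List.pyGetD assignment1 j 0 ∧
              PySem.List.pyGetD assignment2 i 0 = PySem.List.pyGetD assignment2 j 0 then dis + 1
      else dis) dis) 0

-- ===== PORT B =====
-- one fold over zip(assignment1, assignment2) carrying (dis_distance, count1, count2, count12)
def disagreement_dist_alt (assignment1 : List Int) (assignment2 : List Int) : Int :=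
  ((assignment1.zip assignment2).foldl
    (fun (st : Int × PySem.Dict Int Int × PySem.Dict Int Int × PySem.Dict (Int × Int) Int) xy =>
      (st.1 + st.2.1.getD xy.1 0 + st.2.2.1.getD xy.2 0 - 2 * st.2.2.2.getD xy 0,
       st.2.1.modify xy.1 0 (· + 1),
       st.2.2.1.modify xy.2 0 (· + 1),
       st.2.2.2.modify xy 0 (· + 1)))
    (0, PySem.Dict.empty, PySem.Dict.empty, PySem.Dict.empty)).1

-- ===== PRECONDITION & SPEC =====
-- Pre_ excludes exactly the inputs on which A raises IndexError (assignment2 shorter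
-- than assignment1, where the self-pair comparison indexes past assignment2's end);
-- B pairs elements up to the shorter length there and returns a count.
def Pre_disagreement_dist (assignment1 : List Int) (assignment2 : List Int) : Prop :=
  assignment1.length ≤ assignment2.length
instance (assignment1 : List Int) (assignment2 : List Int) : Decidable (Pre_disagreement_dist assignment1 assignment2) := by unfold Pre_disagreement_dist; infer_instance
def pvWitness_disagreement_dist : List Int × List Int := ([1, 2, 1], [1, 1, 2])

def Spec_disagreement_dist (assignment1 : List Int) (assignment2 : List Int) (out : Int) : Prop := out = disagreement_dist_alt assignment1 assignment2
instance (assignment1 : List Int) (assignment2 : List Int) (out : Int) : Decidable (Spec_disagreement_dist assignment1 assignment2 out) := by unfold Spec_disagreement_dist; infer_instance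

-- ===== CLAIM (what is proved, stated in full; the proofs are below) =====
def Claim_equal_disagreement_dist : Prop := ∀ (assignment1 : List Int) (assignment2 : List Int), Dom_disagreement_dist assignment1 assignment2 → Pre_disagreement_dist assignment1 assignment2 → Spec_disagreement_dist assignment1 assignment2 (disagreement_dist assignment1 assignment2)

-- ===== LEMMAS AND PROOFS =====

-- pair disagreement indicator, written arithmetically: 1 exactly when the two
-- positions agree in one clustering and disagree in the other
def pvG (q r : Int × Int) : Int :=
  (if q.1 = r.1 then 1 else 0) + (if q.2 = r.2 then 1 else 0) - 2 * (if q = r then 1 else 0)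

-- the common specification: sum of pvG of each element against itself and the rest
def pvS : List (Int × Int) → Int
  | [] => 0
  | q :: t => ((q :: t).map (pvG q)).sum + pvS t

-- B's per-element contribution against an already-processed prefix p
def pvContrib (p : List (Int × Int)) (xy : Int × Int) : Int :=
  ((p.map Prod.fst).count xy.1 : Int) + ((p.map Prod.snd).count xy.2 : Int) - 2 * (p.count xy : Int)

-- B's fold step and the dictionary states after processing a prefix p
def pvStep (st : Int × PySem.Dict Int Int × PySem.Dict Int Int × PySem.Dict (Int × Int) Int)
    (xy : Int × Int) : Int × PySem.Dict Int Int × PySem.Dict Int Int × PySem.Dict (Int × Int) Int :=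
  (st.1 + st.2.1.getD xy.1 0 + st.2.2.1.getD xy.2 0 - 2 * st.2.2.2.getD xy 0,
   st.2.1.modify xy.1 0 (· + 1),
   st.2.2.1.modify xy.2 0 (· + 1),
   st.2.2.2.modify xy 0 (· + 1))
def pvC1 (p : List (Int × Int)) : PySem.Dict Int Int := p.foldl (fun d xy => d.modify xy.1 0 (· + 1)) PySem.Dict.empty
def pvC2 (p : List (Int × Int)) : PySem.Dict Int Int := p.foldl (fun d xy => d.modify xy.2 0 (· + 1)) PySem.Dict.empty
def pvC12 (p : List (Int × Int)) : PySem.Dict (Int × Int) Int := p.foldl (fun d xy => d.modify xy 0 (· + 1)) PySem.Dict.empty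

-- what B accumulates from list l after having processed prefix p
def pvGAcc : List (Int × Int) → List (Int × Int) → Int
  | _, [] => 0
  | p, q :: l => pvContrib p q + pvGAcc (p ++ [q]) l

theorem pvC1_getD (p : List (Int × Int)) (v : Int) : (pvC1 p).getD v 0 = ((p.map Prod.fst).count v : Int) := by
  have : pvC1 p = (p.map Prod.fst).foldl (fun d x => d.modify x 0 (· + 1)) PySem.Dict.empty := by
    rw [List.foldl_map]; rfl
  rw [this, PySem.Dict.getD_foldl_modify_add_one]
  simp [PySem.Dict.getD]

theorem pvC2_getD (p : List (Int × Int)) (v : Int) : (pvC2 p).getD v 0 = ((p.map Prod.snd).count v : Int) := by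
  have : pvC2 p = (p.map Prod.snd).foldl (fun d x => d.modify x 0 (· + 1)) PySem.Dict.empty := by
    rw [List.foldl_map]; rfl
  rw [this, PySem.Dict.getD_foldl_modify_add_one]
  simp [PySem.Dict.getD]

theorem pvC12_getD (p : List (Int × Int)) (v : Int × Int) : (pvC12 p).getD v 0 = (p.count v : Int) := by
  rw [pvC12, PySem.Dict.getD_foldl_modify_add_one]
  simp [PySem.Dict.getD]

-- loop invariant of B's single pass
theorem pvBfold (l : List (Int × Int)) : ∀ (p : List (Int × Int)) (dis : Int),
    (l.foldl pvStep (dis, pvC1 p, pvC2 p, pvC12 p)).1 = dis + pvGAcc p l := by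
  induction l with
  | nil => intro p dis; simp [pvGAcc]
  | cons q l ih =>
    intro p dis
    have hstep : pvStep (dis, pvC1 p, pvC2 p, pvC12 p) q
        = (dis + pvContrib p q, pvC1 (p ++ [q]), pvC2 (p ++ [q]), pvC12 (p ++ [q])) := by
      simp only [pvStep, pvC1_getD, pvC2_getD, pvC12_getD, Prod.mk.injEq]
      refine ⟨by simp [pvContrib]; ring, ?_, ?_, ?_⟩ <;>
        simp [pvC1, pvC2, pvC12, List.foldl_append]
    rw [List.foldl_cons, hstep, ih (p ++ [q])]
    simp [pvGAcc, add_assoc]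

theorem pvContrib_append (p : List (Int × Int)) (q r : Int × Int) :
    pvContrib (p ++ [q]) r = pvContrib p r + pvG q r := by
  simp [pvContrib, pvG, List.count_append, List.count_singleton, Prod.ext_iff]
  by_cases h1 : q.1 = r.1 <;> by_cases h2 : q.2 = r.2 <;> simp [h1, h2] <;> ring

theorem pvGAcc_eq (l : List (Int × Int)) : ∀ p, pvGAcc p l = (l.map (pvContrib p)).sum + pvS l := by
  induction l with
  | nil => intro p; simp [pvGAcc, pvS]
  | cons q l ih =>
    intro p
    have hg : pvG q q = 0 := by simp [pvG]
    rw [pvGAcc, ih (p ++ [q])]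
    have : l.map (pvContrib (p ++ [q])) = l.map (fun r => pvContrib p r + pvG q r) := by
      apply List.map_congr_left; intro r _; exact pvContrib_append p q r
    rw [this]
    simp [pvS, List.sum_map_add, hg]
    ring

theorem pvB_eq_S (a1 a2 : List Int) : disagreement_dist_alt a1 a2 = pvS (a1.zip a2) := by
  have : disagreement_dist_alt a1 a2
      = ((a1.zip a2).foldl pvStep (0, pvC1 [], pvC2 [], pvC12 [])).1 := rfl
  rw [this, pvBfold, pvGAcc_eq]
  have : (a1.zip a2).map (pvContrib []) = (a1.zip a2).map (fun _ => (0 : Int)) := by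
    apply List.map_congr_left; intro r _; simp [pvContrib]
  rw [this]
  simp

-- A's if/elif body adds exactly pvG of the two pairs
theorem pvIf_eq (q r : Int × Int) (dis : Int) :
    (if q.1 = r.1 ∧ q.2 ≠ r.2 then dis + 1
     else if q.1 ≠ r.1 ∧ q.2 = r.2 then dis + 1 else dis) = dis + pvG q r := by
  by_cases h1 : q.1 = r.1 <;> by_cases h2 : q.2 = r.2 <;>
    simp [pvG, h1, h2, Prod.ext_iff]

theorem pvMap_getD_range {α : Type} (xs : List α) (d : α) :
    (List.range xs.length).map (fun i => xs.getD i d) = xs := by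
  induction xs with
  | nil => simp
  | cons q t ih =>
    rw [List.length_cons, List.range_succ_eq_map, List.map_cons, List.map_map]
    simpa using ih

-- A's suffix-grouped double sum equals the common specification pvS
theorem pvSum_eq_S (l : List (Int × Int)) (d : Int × Int) :
    ((List.range l.length).map (fun k =>
      ((List.range (l.length - k)).map (fun t => pvG (l.getD k d) (l.getD (k + t) d))).sum)).sum
      = pvS l := by
  induction l with
  | nil => simp [pvS]
  | cons q tl ih =>
    rw [List.length_cons, List.range_succ_eq_map, List.map_cons, List.map_map, List.sum_cons]
    have h0 : ((List.range (tl.length + 1 - 0)).map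
        (fun t => pvG ((q :: tl).getD 0 d) ((q :: tl).getD (0 + t) d))).sum
        = ((q :: tl).map (pvG q)).sum := by
      congr 1
      have := congrArg (List.map (pvG q)) (pvMap_getD_range (q :: tl) d)
      rw [List.map_map] at this
      simpa using this
    have h1 : (List.range tl.length).map ((fun k =>
        ((List.range (tl.length + 1 - k)).map
          (fun t => pvG ((q :: tl).getD k d) ((q :: tl).getD (k + t) d))).sum) ∘ (· + 1))
        = (List.range tl.length).map (fun k =>
        ((List.range (tl.length - k)).map (fun t => pvG (tl.getD k d) (tl.getD (k + t) d))).sum) := by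
      apply List.map_congr_left
      intro k _
      simp only [Function.comp]
      congr 1
      rw [show tl.length + 1 - (k + 1) = tl.length - k from by omega]
      apply List.map_congr_left
      intro t _
      have e2 : (q :: tl).getD (k + 1) d = tl.getD k d := by simp
      have e3 : (q :: tl).getD (k + 1 + t) d = tl.getD (k + t) d := by
        have : k + 1 + t = (k + t) + 1 := by omega
        rw [this]; simp
      rw [e2, e3]
    rw [h0]
    have h1' : ((List.range tl.length).map ((fun k =>
        ((List.range (tl.length + 1 - k)).map
          (fun t => pvG ((q :: tl).getD k d) ((q :: tl).getD (k + t) d))).sum) ∘ (· + 1))).sum = pvS tl := by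
      rw [h1]; exact ih
    rw [h1', pvS]

theorem pvA_eq_S (a1 a2 : List Int) (h : a1.length ≤ a2.length) :
    disagreement_dist a1 a2 = pvS (a1.zip a2) := by
  set l := a1.zip a2 with hl
  have hlen : l.length = a1.length := by simp [hl, List.length_zip]; omega
  have hP : ∀ k : Nat, k < a1.length →
      (PySem.List.pyGetD a1 (k : Int) 0, PySem.List.pyGetD a2 (k : Int) 0) = l.getD k (0, 0) := by
    intro k hk
    have hk2 : k < a2.length := lt_of_lt_of_le hk h
    have hkl : k < l.length := by omega
    rw [PySem.List.pyGetD_natCast, PySem.List.pyGetD_natCast,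
      List.getD_eq_getElem a1 0 hk, List.getD_eq_getElem a2 0 hk2,
      List.getD_eq_getElem l (0,0) hkl]
    simp [hl, List.getElem_zip]
  unfold disagreement_dist
  have hbody : ∀ (i : Int),
      (fun (dis : Int) (j : Int) =>
        if PySem.List.pyGetD a1 i 0 = PySem.List.pyGetD a1 j 0 ∧
           PySem.List.pyGetD a2 i 0 ≠ PySem.List.pyGetD a2 j 0 then dis + 1
        else if PySem.List.pyGetD a1 i 0 ≠ PySem.List.pyGetD a1 j 0 ∧
                PySem.List.pyGetD a2 i 0 = PySem.List.pyGetD a2 j 0 then dis + 1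
        else dis)
      = (fun dis j => dis + pvG (PySem.List.pyGetD a1 i 0, PySem.List.pyGetD a2 i 0)
                               (PySem.List.pyGetD a1 j 0, PySem.List.pyGetD a2 j 0)) := by
    intro i; funext dis j
    exact pvIf_eq (PySem.List.pyGetD a1 i 0, PySem.List.pyGetD a2 i 0)
                  (PySem.List.pyGetD a1 j 0, PySem.List.pyGetD a2 j 0) dis
  simp only [hbody, PySem.List.foldl_add]
  rw [zero_add, PySem.List.pyRange_zero_nat, List.map_map]
  rw [← pvSum_eq_S l (0, 0), hlen]
  apply congrArg
  apply List.map_congr_left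
  intro k hk
  rw [List.mem_range] at hk
  simp only [Function.comp]
  rw [PySem.List.pyRange_one, List.map_map]
  rw [show (((a1.length : Int) - (k : Int)).toNat) = a1.length - k from by omega]
  apply congrArg
  apply List.map_congr_left
  intro t ht
  rw [List.mem_range] at ht
  simp only [Function.comp]
  rw [show ((k : Int) + (t : Int)) = ((k + t : Nat) : Int) from by push_cast; ring]
  rw [hP k hk, hP (k + t) (by omega)]

-- ===== VERDICT (by name: the statement is the Claim_ definition above) =====
theorem disagreement_dist_spec : Claim_equal_disagreement_dist := by
  intro a1 a2 _ hpre
  unfold Spec_disagreement_dist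
  rw [pvA_eq_S a1 a2 hpre, pvB_eq_S]
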